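-- pv_equiv track=rewrite | github.com/pypi-data/pypi-mirror-327 | packages/xi_covutils/xi_covutils-0.7.0.6.tar.gz/xi_covutils-0.7.0.6/xi_covutils/msa/_msa.py | _gapstrip_template
-- ===== SOURCE A (Python) =====
-- def _gapstrip_template(sequences:list[str], use_reference:bool) -> list[bool]:
--   if use_reference:
--     template = [char == "-" for char in sequences[0]]
--   else:
--     templates = [[char == "-" for char in seq] for seq in sequences]
--     template = [True for _ in range(len(templates[0]))]
--     for temp in templates:
--       template = [x and y for x, y in zip(temp, template)]
--   return template
-- ===== SOURCE B (Python) =====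
-- def _gapstrip_template(sequences: list[str], use_reference: bool) -> list[bool]:
--   if use_reference:
--     return [char == "-" for char in sequences[0]]
--   n = min(len(seq) for seq in sequences)
--   return [all(seq[i] == "-" for seq in sequences) for i in range(n)]
-- ===== Notes on version B (the rewrite author's own statement) =====
-- stated objective: simpler
-- what changed: Drops the per-sequence boolean mask lists and the repeated zip-AND folding; instead computes the minimum sequence length once and does a single column-wise scan testing all(seq[i] == '-') per column.
import Mathlib
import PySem

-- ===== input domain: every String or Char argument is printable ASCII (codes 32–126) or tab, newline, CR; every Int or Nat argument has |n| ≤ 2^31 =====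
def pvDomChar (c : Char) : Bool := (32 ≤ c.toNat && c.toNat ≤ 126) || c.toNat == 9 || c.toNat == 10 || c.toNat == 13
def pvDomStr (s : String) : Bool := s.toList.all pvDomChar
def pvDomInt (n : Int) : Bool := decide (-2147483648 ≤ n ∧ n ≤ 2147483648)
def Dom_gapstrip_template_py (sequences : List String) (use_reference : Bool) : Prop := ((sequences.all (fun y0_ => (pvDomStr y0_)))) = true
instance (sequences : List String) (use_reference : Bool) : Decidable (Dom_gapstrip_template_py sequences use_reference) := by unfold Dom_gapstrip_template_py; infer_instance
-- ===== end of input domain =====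

-- B replaces the per-sequence boolean masks and repeated zip-AND folds with one
-- column-wise scan over the first min-length columns (objective: simpler).

-- ===== PORT A =====
def gapstrip_template_py (sequences : List String) (use_reference : Bool) : List Bool :=
  if use_reference then
    -- template = [char == "-" for char in sequences[0]]
    (match PySem.List.pyGet? sequences 0 with
     | some s => s.toList.map (fun char => char == '-')
     | none => [])
  else
    -- templates = [[char == "-" for char in seq] for seq in sequences]
    let templates := sequences.map (fun seq => seq.toList.map (fun char => char == '-'))
    -- template = [True for _ in range(len(templates[0]))]
    let len0 : Int :=
      match PySem.List.pyGet? templates 0 with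
      | some t => (t.length : Int)
      | none => 0
    let template := (PySem.List.pyRange 0 len0 1).map (fun _ => true)
    -- for temp in templates: template = [x and y for x, y in zip(temp, template)]
    templates.foldl (fun template temp => (temp.zip template).map (fun p => p.1 && p.2)) template

-- ===== PORT B =====
def gapstrip_template_py_alt (sequences : List String) (use_reference : Bool) : List Bool :=
  if use_reference then
    (match PySem.List.pyGet? sequences 0 with
     | some s => s.toList.map (fun char => char == '-')
     | none => [])
  else
    -- n = min(len(seq) for seq in sequences)
    let n : Int := (PySem.List.min? (sequences.map (fun seq => PySem.Str.len seq)) (fun x => x)).getD 0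
    -- [all(seq[i] == "-" for seq in sequences) for i in range(n)]
    (PySem.List.pyRange 0 n 1).map
      (fun i => sequences.all (fun seq => PySem.List.pyGet? seq.toList i == some '-'))

-- ===== PRECONDITION & SPEC =====
-- Pre_ excludes only the empty list, on which A raises IndexError (sequences[0] / templates[0]).
def Pre_gapstrip_template_py (sequences : List String) (use_reference : Bool) : Prop :=
  sequences ≠ []
instance (sequences : List String) (use_reference : Bool) : Decidable (Pre_gapstrip_template_py sequences use_reference) := by unfold Pre_gapstrip_template_py; infer_instance
def pvWitness_gapstrip_template_py : List String × Bool := (["a-c", "-bc"], false)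

def Spec_gapstrip_template_py (sequences : List String) (use_reference : Bool) (out : List Bool) : Prop := out = gapstrip_template_py_alt sequences use_reference
instance (sequences : List String) (use_reference : Bool) (out : List Bool) : Decidable (Spec_gapstrip_template_py sequences use_reference out) := by unfold Spec_gapstrip_template_py; infer_instance

-- ===== CLAIM (what is proved, stated in full; the proofs are below) =====
def Claim_equal_gapstrip_template_py : Prop := ∀ (sequences : List String) (use_reference : Bool), Dom_gapstrip_template_py sequences use_reference → Pre_gapstrip_template_py sequences use_reference → Spec_gapstrip_template_py sequences use_reference (gapstrip_template_py sequences use_reference)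

-- ===== LEMMAS AND PROOFS =====

-- A's fold step, characterized element-wise.
lemma foldA_getElem? (ts : List (List Bool)) (acc : List Bool) (i : Nat) :
    (ts.foldl (fun a t => (t.zip a).map (fun p => p.1 && p.2)) acc)[i]? =
      if ∀ t ∈ ts, i < t.length then
        (acc[i]?).map (fun b => b && ts.all (fun t => t.getD i true))
      else none := by
  induction ts generalizing acc with
  | nil => simp
  | cons t ts ih =>
    rw [List.foldl_cons, ih]
    by_cases ht : i < t.length
    · by_cases hacc : i < acc.length
      · have hz : ((t.zip acc).map (fun p => p.1 && p.2))[i]? = some (t[i] && acc[i]) := by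
          simp [ht, hacc]
        by_cases hts : ∀ u ∈ ts, i < u.length
        · rw [if_pos hts, hz,
            if_pos (by intro u hu; rcases List.mem_cons.1 hu with rfl | hu
                       exacts [ht, hts u hu])]
          rw [List.getElem?_eq_getElem hacc]
          simp [List.getD_eq_getElem?_getD, ht]
          cases acc[i] <;> cases t[i] <;> simp
        · rw [if_neg hts,
            if_neg (show ¬ ∀ u ∈ t :: ts, i < u.length from
              fun h => hts fun u hu => h u (List.mem_cons_of_mem _ hu))]
      · have hz : ((t.zip acc).map (fun p => p.1 && p.2))[i]? = none := by
          simp; omega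
        rw [hz]
        simp [List.getElem?_eq_none_iff.2 (by omega : acc.length ≤ i)]
    · have hz : ((t.zip acc).map (fun p => p.1 && p.2))[i]? = none := by
        simp; omega
      rw [hz, if_neg (show ¬ ∀ u ∈ t :: ts, i < u.length from
        fun h => ht (h t List.mem_cons_self))]
      split <;> simp

-- congruence for List.all under pointwise agreement on members
lemma all_congr_mem' {α : Type} {l : List α} {f g : α → Bool}
    (h : ∀ x ∈ l, f x = g x) : l.all f = l.all g := by
  induction l with
  | nil => rfl
  | cons x xs ih =>
    simp only [List.all_cons, h x (List.mem_cons_self), 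
      ih (fun y hy => h y (List.mem_cons_of_mem _ hy))]

-- the minimum n computed by B, as a fold over Int lengths
lemma minLen_spec (s : String) (rest : List String) :
    ∀ n, n = (rest.map (fun seq => PySem.Str.len seq)).foldl min (PySem.Str.len s) →
      (0 ≤ n ∧ (∀ u ∈ s :: rest, n ≤ (u.toList.length : Int)) ∧
        ∃ u ∈ s :: rest, n = (u.toList.length : Int)) := by
  intro n hn
  have hle := PySem.List.foldl_min_le (rest.map (fun seq => PySem.Str.len seq)) (PySem.Str.len s)
  have hmem := PySem.List.foldl_min_mem (rest.map (fun seq => PySem.Str.len seq)) (PySem.Str.len s)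
  rw [← hn] at hle hmem
  have hlen : ∀ u : String, PySem.Str.len u = (u.toList.length : Int) := fun u => by
    simp [PySem.Str.len_eq]
  constructor
  · rcases hmem with h | h
    · rw [h, hlen]; positivity
    · obtain ⟨u, hu, hv⟩ := List.mem_map.1 h
      rw [← hv, hlen]; positivity
  constructor
  · intro u hu
    rcases List.mem_cons.1 hu with rfl | hu
    · rw [← hlen]; exact hle.1
    · have := hle.2 (PySem.Str.len u) (List.mem_map_of_mem hu)
      rw [← hlen]; exact this
  · rcases hmem with h | h
    · exact ⟨s, List.mem_cons_self, by rw [h, hlen]⟩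
    · obtain ⟨u, hu, hv⟩ := List.mem_map.1 h
      exact ⟨u, List.mem_cons_of_mem _ hu, by rw [← hv, hlen]⟩

-- ===== VERDICT (by name: the statement is the Claim_ definition above) =====
theorem gapstrip_template_py_spec : Claim_equal_gapstrip_template_py := by
  intro sequences use_reference _ hpre
  unfold Spec_gapstrip_template_py
  cases use_reference with
  | true => rfl
  | false =>
    obtain ⟨s, rest, rfl⟩ := List.exists_cons_of_ne_nil hpre
    unfold gapstrip_template_py gapstrip_template_py_alt
    simp only [Bool.false_eq_true, if_false]
    set n : Int := (PySem.List.min? ((s :: rest).map (fun seq => PySem.Str.len seq)) (fun x => x)).getD 0 with hndef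
    have hn : n = (rest.map (fun seq => PySem.Str.len seq)).foldl min (PySem.Str.len s) := by
      rw [hndef, List.map_cons, PySem.List.min?_id_cons, Option.getD_some]
    obtain ⟨hn0, hnle, hnmem⟩ := minLen_spec s rest n hn
    have hlen0 : (match PySem.List.pyGet? ((s :: rest).map (fun seq => seq.toList.map (fun char => char == '-'))) 0 with
        | some t => ((t.length : Int)) | none => (0 : Int)) = (s.toList.length : Int) := by
      simp
    apply List.ext_getElem?
    intro i
    rw [foldA_getElem?, hlen0, List.getElem?_map, List.getElem?_map,
      PySem.List.getElem?_pyRange_one, PySem.List.getElem?_pyRange_one]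
    simp only [Int.sub_zero, Int.zero_add, Int.toNat_natCast]
    by_cases hcond : ∀ t ∈ List.map (fun s => List.map (fun char => char == '-') s.toList) (s :: rest), i < t.length
    · have hiu : ∀ u ∈ s :: rest, i < u.toList.length := by
        intro u hu
        simpa using hcond _ (List.mem_map_of_mem hu)
      have hi0 : i < s.toList.length := hiu s List.mem_cons_self
      have hin : i < n.toNat := by
        obtain ⟨u, hu, hnu⟩ := hnmem
        have := hiu u hu
        omega
      rw [if_pos hcond, if_pos hi0, if_pos hin]
      simp only [Option.map_some, Option.some.injEq, Bool.true_and]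
      rw [List.all_map]
      apply all_congr_mem'
      intro u hu
      have hiu' := hiu u hu
      simp [List.getD_eq_getElem?_getD, List.getElem?_eq_getElem hiu',
        PySem.List.pyGet?_natCast]
    · have hnin : ¬ i < n.toNat := by
        intro hin
        exact hcond (by
          intro t ht
          obtain ⟨u, hu, rfl⟩ := List.mem_map.1 ht
          have := hnle u hu
          simp only [List.length_map]
          omega)
      rw [if_neg hcond, if_neg hnin]
      rfl
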